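-- pv_equiv track=rewrite | github.com/franza73/puzzles | 2024/ibm_oct_2024.py | decimal_to_factors
-- ===== SOURCE A (Python) =====
-- from collections import Counter
--
-- def decimal_to_factors(d):
--     h = Counter({2: 0, 3: 0, 7: 0})
--     for di in str(d):
--         di = int(di)
--         if di in h:
--             h[di] += 1
--         elif di == 4:
--             h[2] += 2
--         elif di == 9:
--             h[3] += 2
--         elif di == 6:
--             h[2] += 1
--             h[3] += 1
--         elif di == 8:
--             h[2] += 3
--     return h
-- ===== SOURCE B (Python) =====
-- def decimal_to_factors(d):
--     h = {2: 0, 3: 0, 7: 0}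
--     for ch in str(d):
--         di = int(ch)
--         if di < 2:
--             continue
--         for p in (2, 3, 7):
--             while di % p == 0:
--                 h[p] += 1
--                 di //= p
--     return h
-- ===== Notes on version B (the rewrite author's own statement) =====
-- stated objective: alternative
-- what changed: B computes the per-digit factor counts by actual trial division of each digit over the primes (2, 3, 7) on a plain dict, instead of A's hardcoded digit-by-digit if/elif Counter-update table.
import Mathlib
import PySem

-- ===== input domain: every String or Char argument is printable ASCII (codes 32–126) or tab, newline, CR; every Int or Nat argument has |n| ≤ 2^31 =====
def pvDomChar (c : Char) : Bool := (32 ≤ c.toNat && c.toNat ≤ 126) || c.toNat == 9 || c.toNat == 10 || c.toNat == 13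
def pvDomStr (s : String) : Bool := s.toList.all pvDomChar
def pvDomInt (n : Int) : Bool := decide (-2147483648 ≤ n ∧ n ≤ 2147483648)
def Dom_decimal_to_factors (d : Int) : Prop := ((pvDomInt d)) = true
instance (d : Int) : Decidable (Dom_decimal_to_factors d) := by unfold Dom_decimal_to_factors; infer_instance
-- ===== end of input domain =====

-- B replaces A's hardcoded digit->factor-count if/elif table by actual trial division of each
-- digit over the primes (2, 3, 7); objective: alternative algorithm, same cost, not faster.

-- ===== PORT A =====
-- one iteration of A's loop body (di = int(ch) already done): the Counter update table
def pvStepA (h : PySem.Dict Int Int) (di : Int) : PySem.Dict Int Int :=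
  if h.contains di then h.modify di 0 (· + 1)
  else if di = 4 then h.modify 2 0 (· + 2)
  else if di = 9 then h.modify 3 0 (· + 2)
  else if di = 6 then (h.modify 2 0 (· + 1)).modify 3 0 (· + 1)
  else if di = 8 then h.modify 2 0 (· + 3)
  else h

-- for di in str(d): di = int(di); … — int() may raise ValueError, carried as Option state
def decimal_to_factors (d : Int) : List (Int × Int) :=
  match (PySem.Int.toChars d).foldl
      (fun (oh : Option (PySem.Dict Int Int)) c =>
        oh.bind (fun h => (PySem.Int.ofChars? [c]).map (pvStepA h)))
      (some (PySem.Dict.ofList [(2, 0), (3, 0), (7, 0)])) with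
  | none => []   -- int() raised ValueError; excluded by Pre_ (only happens for d < 0)
  | some h => h.items

-- ===== PORT B =====
-- while di % p == 0: h[p] += 1; di //= p   (the '0 < di' / '2 ≤ p' guards only ensure
-- termination in Lean; they hold at every call B's code actually makes)
def pvDivLoop (p : Int) (s : Int × PySem.Dict Int Int) : Int × PySem.Dict Int Int :=
  if hc : 0 < s.1 ∧ 2 ≤ p ∧ PySem.Int.mod s.1 p = 0 then
    pvDivLoop p (PySem.Int.floordiv s.1 p, s.2.modify p 0 (· + 1))
  else s
termination_by s.1.toNat
decreasing_by
  obtain ⟨h1, h2, _⟩ := hc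
  rw [PySem.Int.floordiv_eq_ediv_of_pos (by omega)]
  have ha : s.1 = (s.1.toNat : Int) := (Int.toNat_of_nonneg (by omega)).symm
  have hp : p = (p.toNat : Int) := (Int.toNat_of_nonneg (by omega)).symm
  rw [ha, hp, ← Int.natCast_div, Int.toNat_natCast, Int.toNat_natCast]
  exact Nat.div_lt_self (by omega) (by omega)

-- one iteration of B's loop body: trial division of the digit over (2, 3, 7)
def pvStepB (h : PySem.Dict Int Int) (di : Int) : PySem.Dict Int Int :=
  if di < 2 then h
  else (([2, 3, 7] : List Int).foldl (fun s p => pvDivLoop p s) (di, h)).2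

def decimal_to_factors_alt (d : Int) : List (Int × Int) :=
  match (PySem.Int.toChars d).foldl
      (fun (oh : Option (PySem.Dict Int Int)) c =>
        oh.bind (fun h => (PySem.Int.ofChars? [c]).map (pvStepB h)))
      (some (PySem.Dict.ofList [(2, 0), (3, 0), (7, 0)])) with
  | none => []   -- int() raised ValueError; excluded by Pre_ (only happens for d < 0)
  | some h => h.items

-- ===== PRECONDITION & SPEC =====
-- For d < 0, str(d) starts with '-' and int('-') raises ValueError in both A and B.
def Pre_decimal_to_factors (d : Int) : Prop := 0 ≤ d
instance (d : Int) : Decidable (Pre_decimal_to_factors d) := by unfold Pre_decimal_to_factors; infer_instance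
def pvWitness_decimal_to_factors : Int := 248697310

def Spec_decimal_to_factors (d : Int) (out : List (Int × Int)) : Prop := out = decimal_to_factors_alt d
instance (d : Int) (out : List (Int × Int)) : Decidable (Spec_decimal_to_factors d out) := by unfold Spec_decimal_to_factors; infer_instance

-- ===== CLAIM (what is proved, stated in full; the proofs are below) =====
def Claim_equal_decimal_to_factors : Prop := ∀ (d : Int), Dom_decimal_to_factors d → Pre_decimal_to_factors d → Spec_decimal_to_factors d (decimal_to_factors d)

-- ===== LEMMAS AND PROOFS =====

-- the state shape both loops preserve: the counter with exactly the keys 2, 3, 7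
def pvMk3 (a b c : Int) : PySem.Dict Int Int := PySem.Dict.mk [(2, a), (3, b), (7, c)]

lemma pvMk3_ofList : PySem.Dict.ofList [((2:Int), (0:Int)), (3, 0), (7, 0)] = pvMk3 0 0 0 := by
  decide

-- unfolding lemmas for B's while loop
lemma pvDl_pos (p di : Int) (h : PySem.Dict Int Int) (h1 : 0 < di) (h2 : 2 ≤ p)
    (h3 : PySem.Int.mod di p = 0) :
    pvDivLoop p (di, h) = pvDivLoop p (PySem.Int.floordiv di p, h.modify p 0 (· + 1)) := by
  rw [pvDivLoop]; exact dif_pos ⟨h1, h2, h3⟩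

lemma pvDl_neg (p di : Int) (h : PySem.Dict Int Int) (h3 : PySem.Int.mod di p ≠ 0) :
    pvDivLoop p (di, h) = (di, h) := by
  rw [pvDivLoop]; exact dif_neg (by simp [h3])

-- every char produced by Nat.toDigits 10 is a decimal digit char
lemma pvMem_toDigitsCore (f : Nat) : ∀ (n : Nat) (acc : List Char) (c : Char),
    c ∈ Nat.toDigitsCore 10 f n acc → c ∈ acc ∨ ∃ k, k < 10 ∧ c = Nat.digitChar k := by
  induction f with
  | zero => intro n acc c h; exact Or.inl h
  | succ f ih =>
    intro n acc c h
    simp only [Nat.toDigitsCore] at h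
    split at h
    · rcases List.mem_cons.mp h with h | h
      · exact Or.inr ⟨n % 10, Nat.mod_lt _ (by omega), h⟩
      · exact Or.inl h
    · rcases ih (n / 10) (Nat.digitChar (n % 10) :: acc) c h with h' | h'
      · rcases List.mem_cons.mp h' with h'' | h''
        · exact Or.inr ⟨n % 10, Nat.mod_lt _ (by omega), h''⟩
        · exact Or.inl h''
      · exact Or.inr h'

-- for d ≥ 0 every char of str(d) is a decimal digit char
lemma pvMem_toChars {d : Int} (hd : 0 ≤ d) {c : Char} (hc : c ∈ PySem.Int.toChars d) :
    ∃ k, k < 10 ∧ c = Nat.digitChar k := by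
  unfold PySem.Int.toChars at hc
  rw [if_neg (by omega)] at hc
  rcases pvMem_toDigitsCore _ _ _ _ hc with h | h
  · simp at h
  · exact h

-- int(ch) of a digit char is its value
lemma pvOfChars_digit {k : Nat} (hk : k < 10) :
    PySem.Int.ofChars? [Nat.digitChar k] = some (k : Int) := by
  interval_cases k <;> decide

-- the heart: on any state of the preserved shape, A's table step and B's trial-division
-- step produce the SAME dict, again of that shape
lemma pvStep_agree (k : Nat) (hk : k < 10) (a b c : Int) :
    ∃ x y z, pvStepA (pvMk3 a b c) (k : Int) = pvMk3 x y z ∧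
             pvStepB (pvMk3 a b c) (k : Int) = pvMk3 x y z := by
  interval_cases k
  · -- digit 0
    refine ⟨a, b, c, ?_, ?_⟩
    · simp [pvStepA, pvMk3, PySem.Dict.contains]
    · simp [pvStepB]
  · -- digit 1
    refine ⟨a, b, c, ?_, ?_⟩
    · simp [pvStepA, pvMk3, PySem.Dict.contains]
    · simp [pvStepB]
  · -- digit 2
    refine ⟨(a + 1), b, c, ?_, ?_⟩
    · simp [pvStepA, pvMk3, PySem.Dict.contains, PySem.Dict.modify, PySem.Dict.insert,
            PySem.Dict.getD, PySem.Dict.get?]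
      try omega
    · unfold pvStepB
      rw [if_neg (by norm_num)]
      simp only [List.foldl, Nat.cast_ofNat]
      simp [pvDl_pos, pvDl_neg, PySem.Int.mod, PySem.Int.floordiv]
      try simp [pvMk3, PySem.Dict.modify, PySem.Dict.insert, PySem.Dict.getD,
            PySem.Dict.get?]
      try omega
  · -- digit 3
    refine ⟨a, (b + 1), c, ?_, ?_⟩
    · simp [pvStepA, pvMk3, PySem.Dict.contains, PySem.Dict.modify, PySem.Dict.insert,
            PySem.Dict.getD, PySem.Dict.get?]
      try omega
    · unfold pvStepB
      rw [if_neg (by norm_num)]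
      simp only [List.foldl, Nat.cast_ofNat]
      simp [pvDl_pos, pvDl_neg, PySem.Int.mod, PySem.Int.floordiv]
      try simp [pvMk3, PySem.Dict.modify, PySem.Dict.insert, PySem.Dict.getD,
            PySem.Dict.get?]
      try omega
  · -- digit 4
    refine ⟨(a + 2), b, c, ?_, ?_⟩
    · simp [pvStepA, pvMk3, PySem.Dict.contains, PySem.Dict.modify, PySem.Dict.insert,
            PySem.Dict.getD, PySem.Dict.get?]
      try omega
    · unfold pvStepB
      rw [if_neg (by norm_num)]
      simp only [List.foldl, Nat.cast_ofNat]
      simp [pvDl_pos, pvDl_neg, PySem.Int.mod, PySem.Int.floordiv]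
      try simp [pvMk3, PySem.Dict.modify, PySem.Dict.insert, PySem.Dict.getD,
            PySem.Dict.get?]
      try omega
  · -- digit 5
    refine ⟨a, b, c, ?_, ?_⟩
    · simp [pvStepA, pvMk3, PySem.Dict.contains]
    · unfold pvStepB
      rw [if_neg (by norm_num)]
      simp only [List.foldl, Nat.cast_ofNat]
      simp [pvDl_neg, PySem.Int.mod]
  · -- digit 6
    refine ⟨(a + 1), (b + 1), c, ?_, ?_⟩
    · simp [pvStepA, pvMk3, PySem.Dict.contains, PySem.Dict.modify, PySem.Dict.insert,
            PySem.Dict.getD, PySem.Dict.get?]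
      try omega
    · unfold pvStepB
      rw [if_neg (by norm_num)]
      simp only [List.foldl, Nat.cast_ofNat]
      simp [pvDl_pos, pvDl_neg, PySem.Int.mod, PySem.Int.floordiv]
      try simp [pvMk3, PySem.Dict.modify, PySem.Dict.insert, PySem.Dict.getD,
            PySem.Dict.get?]
      try omega
  · -- digit 7
    refine ⟨a, b, (c + 1), ?_, ?_⟩
    · simp [pvStepA, pvMk3, PySem.Dict.contains, PySem.Dict.modify, PySem.Dict.insert,
            PySem.Dict.getD, PySem.Dict.get?]
      try omega
    · unfold pvStepB
      rw [if_neg (by norm_num)]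
      simp only [List.foldl, Nat.cast_ofNat]
      simp [pvDl_pos, pvDl_neg, PySem.Int.mod, PySem.Int.floordiv]
      try simp [pvMk3, PySem.Dict.modify, PySem.Dict.insert, PySem.Dict.getD,
            PySem.Dict.get?]
      try omega
  · -- digit 8
    refine ⟨(a + 3), b, c, ?_, ?_⟩
    · simp [pvStepA, pvMk3, PySem.Dict.contains, PySem.Dict.modify, PySem.Dict.insert,
            PySem.Dict.getD, PySem.Dict.get?]
      try omega
    · unfold pvStepB
      rw [if_neg (by norm_num)]
      simp only [List.foldl, Nat.cast_ofNat]
      simp [pvDl_pos, pvDl_neg, PySem.Int.mod, PySem.Int.floordiv]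
      try simp [pvMk3, PySem.Dict.modify, PySem.Dict.insert, PySem.Dict.getD,
            PySem.Dict.get?]
      try omega
  · -- digit 9
    refine ⟨a, (b + 2), c, ?_, ?_⟩
    · simp [pvStepA, pvMk3, PySem.Dict.contains, PySem.Dict.modify, PySem.Dict.insert,
            PySem.Dict.getD, PySem.Dict.get?]
      try omega
    · unfold pvStepB
      rw [if_neg (by norm_num)]
      simp only [List.foldl, Nat.cast_ofNat]
      simp [pvDl_pos, pvDl_neg, PySem.Int.mod, PySem.Int.floordiv]
      try simp [pvMk3, PySem.Dict.modify, PySem.Dict.insert, PySem.Dict.getD,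
            PySem.Dict.get?]
      try omega

-- the two folds agree from any shaped state when every char is a digit
lemma pvFold_agree : ∀ (cs : List Char) (a b c : Int),
    (∀ ch ∈ cs, ∃ k, k < 10 ∧ ch = Nat.digitChar k) →
    ∃ x y z,
      cs.foldl (fun (oh : Option (PySem.Dict Int Int)) ch =>
          oh.bind (fun h => (PySem.Int.ofChars? [ch]).map (pvStepA h))) (some (pvMk3 a b c))
        = some (pvMk3 x y z) ∧
      cs.foldl (fun (oh : Option (PySem.Dict Int Int)) ch =>
          oh.bind (fun h => (PySem.Int.ofChars? [ch]).map (pvStepB h))) (some (pvMk3 a b c))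
        = some (pvMk3 x y z) := by
  intro cs
  induction cs with
  | nil => exact fun a b c _ => ⟨a, b, c, rfl, rfl⟩
  | cons ch cs ih =>
    intro a b c hdig
    obtain ⟨k, hk, rfl⟩ := hdig ch (by simp)
    obtain ⟨x, y, z, hA, hB⟩ := pvStep_agree k hk a b c
    obtain ⟨x', y', z', hA', hB'⟩ := ih x y z (fun c hc => hdig c (by simp [hc]))
    refine ⟨x', y', z', ?_, ?_⟩
    · simpa [List.foldl, pvOfChars_digit hk, hA] using hA'
    · simpa [List.foldl, pvOfChars_digit hk, hB] using hB'

-- ===== VERDICT (by name: the statement is the Claim_ definition above) =====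
theorem decimal_to_factors_spec : Claim_equal_decimal_to_factors := by
  intro d _ hpre
  unfold Spec_decimal_to_factors decimal_to_factors decimal_to_factors_alt
  rw [pvMk3_ofList]
  obtain ⟨x, y, z, hA, hB⟩ := pvFold_agree (PySem.Int.toChars d) 0 0 0
    (fun ch hch => pvMem_toChars hpre hch)
  rw [hA, hB]
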